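-- pv_equiv track=rewrite | github.com/prattsm/body-metrics-tracker | src/body_metrics_tracker/gui/profile.py | _format_days
-- ===== SOURCE A (Python) =====
-- def _format_days(days: list[int]) -> str:
--     if not days:
--         return "No days"
--     days_set = set(days)
--     all_days = {0, 1, 2, 3, 4, 5, 6}
--     if days_set == all_days:
--         return "Every day"
--     labels = {0: "Mon", 1: "Tue", 2: "Wed", 3: "Thu", 4: "Fri", 5: "Sat", 6: "Sun"}
--     ordered = ["Sun", "Mon", "Tue", "Wed", "Thu", "Fri", "Sat"]
--     sorted_days = sorted(days_set, key=lambda item: ordered.index(labels[item]))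
--     return ", ".join(labels[idx] for idx in sorted_days)
-- ===== SOURCE B (Python) =====
-- def _format_days(days: list[int]) -> str:
--     if not days:
--         return "No days"
--     rank = {6: 0, 0: 1, 1: 2, 2: 3, 3: 4, 4: 5, 5: 6}
--     ranks = {rank[d] for d in set(days)}
--     if len(ranks) == 7:
--         return "Every day"
--     ordered = ["Sun", "Mon", "Tue", "Wed", "Thu", "Fri", "Sat"]
--     return ", ".join(ordered[r] for r in range(7) if r in ranks)
-- ===== Notes on version B (the rewrite author's own statement) =====
-- stated objective: alternative
-- what changed: A sorts the deduplicated days with a label-position key and tests set equality against {0..6}; B maps each day to its Sunday-first rank (rank[d], which raises KeyError on invalid days exactly where A's labels[item] does), tests whether all 7 ranks are present by counting, and emits labels by filtering range(7) on rank membership — no sort at all.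
import Mathlib
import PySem

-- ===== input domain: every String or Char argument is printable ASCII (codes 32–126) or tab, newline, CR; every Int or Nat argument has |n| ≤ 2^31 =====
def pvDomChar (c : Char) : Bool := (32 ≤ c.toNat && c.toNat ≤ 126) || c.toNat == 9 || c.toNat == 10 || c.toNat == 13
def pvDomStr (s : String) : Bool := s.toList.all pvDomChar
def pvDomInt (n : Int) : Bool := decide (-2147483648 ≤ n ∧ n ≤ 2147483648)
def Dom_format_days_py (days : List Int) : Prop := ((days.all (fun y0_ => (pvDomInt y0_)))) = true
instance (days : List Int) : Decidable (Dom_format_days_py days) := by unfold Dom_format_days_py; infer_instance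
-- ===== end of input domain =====

-- B replaces A's comparison sort (key = position of the label in a Sunday-first list) by mapping each
-- day to its Sunday-first rank and filtering range(7) by rank membership — objective: alternative.

-- ===== PORT A =====
-- labels dict of A
def pvLabelsA : PySem.Dict Int String :=
  PySem.Dict.ofList [(0, "Mon"), (1, "Tue"), (2, "Wed"), (3, "Thu"), (4, "Fri"), (5, "Sat"), (6, "Sun")]

-- A's sort key: ordered.index(labels[item]); labels[item] / .index raise outside Pre_, the
-- defaults below are never reached inside Pre_ (the tester samples inside Pre_).
def pvKeyA (item : Int) : Nat :=
  (PySem.List.index? ["Sun", "Mon", "Tue", "Wed", "Thu", "Fri", "Sat"] (pvLabelsA.getD item "")).getD 0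

def format_days_py (days : List Int) : String :=
  if days = [] then "No days"
  else
    let daysSet : PySem.Set Int := PySem.Set.ofList days
    let allDays : PySem.Set Int := PySem.Set.ofList [0, 1, 2, 3, 4, 5, 6]
    if PySem.Set.equal daysSet allDays then "Every day"
    else
      let sortedDays := PySem.List.sorted daysSet pvKeyA
      PySem.Str.join ", " (sortedDays.map (fun idx => pvLabelsA.getD idx ""))

-- ===== PORT B =====
-- B's rank dict; rank[d] raises KeyError outside Pre_ (like A's labels[item]), the default 0
-- is never reached inside Pre_.
def pvRank : PySem.Dict Int Int :=
  PySem.Dict.ofList [(6, 0), (0, 1), (1, 2), (2, 3), (3, 4), (4, 5), (5, 6)]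

def pvRankF (d : Int) : Int := pvRank.getD d 0

def format_days_py_alt (days : List Int) : String :=
  if days = [] then "No days"
  else
    let ranks : PySem.Set Int := PySem.Set.ofList ((PySem.Set.ofList days).map pvRankF)
    if PySem.Set.len ranks = 7 then "Every day"
    else
      PySem.Str.join ", "
        (((PySem.List.pyRange 0 7 1).filter (fun r => PySem.Set.contains ranks r)).map
          (fun r => PySem.List.pyGetD ["Sun", "Mon", "Tue", "Wed", "Thu", "Fri", "Sat"] r ""))

-- ===== PRECONDITION & SPEC =====
-- Pre_ excludes inputs containing a day outside 0..6: there A raises KeyError (labels[item] in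
-- the sort key), and B raises KeyError too (rank[d]).
def Pre_format_days_py (days : List Int) : Prop := ∀ d ∈ days, 0 ≤ d ∧ d ≤ 6
instance (days : List Int) : Decidable (Pre_format_days_py days) := by unfold Pre_format_days_py; infer_instance
def pvWitness_format_days_py : List Int := [5, 2, 2, 0]

def Spec_format_days_py (days : List Int) (out : String) : Prop := out = format_days_py_alt days
instance (days : List Int) (out : String) : Decidable (Spec_format_days_py days out) := by unfold Spec_format_days_py; infer_instance

-- ===== CLAIM (what is proved, stated in full; the proofs are below) =====
def Claim_equal_format_days_py : Prop := ∀ (days : List Int), Dom_format_days_py days → Pre_format_days_py days → Spec_format_days_py days (format_days_py days)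

-- ===== LEMMAS AND PROOFS =====

-- members of set(days) lie in 0..6 under Pre_
theorem pv_mem_set (days : List Int) (hpre : Pre_format_days_py days)
    {x : Int} (hx : x ∈ PySem.Set.ofList days) : 0 ≤ x ∧ x ≤ 6 :=
  hpre x ((PySem.Set.mem_ofList days x).mp hx)

theorem pv_subset_all (days : List Int) (hpre : Pre_format_days_py days) :
    PySem.Set.ofList days ⊆ ([0, 1, 2, 3, 4, 5, 6] : List Int) := by
  intro x hx
  have h := pv_mem_set days hpre hx
  simp only [List.mem_cons, List.not_mem_nil, or_false]
  omega

-- the rank map is injective on valid days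
theorem pv_rank_inj (a b : Int) (ha0 : 0 ≤ a) (ha6 : a ≤ 6) (hb0 : 0 ≤ b) (hb6 : b ≤ 6)
    (h : pvRankF a = pvRankF b) : a = b := by
  interval_cases a <;> interval_cases b <;> revert h <;> decide

-- membership in B's rank set expressed in day space, under Pre_
theorem pv_mem_ranks_iff (days : List Int) (hpre : Pre_format_days_py days)
    (d : Int) (hd0 : 0 ≤ d) (hd6 : d ≤ 6) :
    pvRankF d ∈ PySem.Set.ofList ((PySem.Set.ofList days).map pvRankF) ↔
    d ∈ PySem.Set.ofList days := by
  rw [PySem.Set.mem_ofList, List.mem_map]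
  constructor
  · rintro ⟨d', hd', hr⟩
    have hb := pv_mem_set days hpre hd'
    rwa [pv_rank_inj d' d hb.1 hb.2 hd0 hd6 hr] at hd'
  · exact fun h => ⟨d, h, rfl⟩

-- the two "Every day" tests agree under Pre_
theorem pv_everyday_iff (days : List Int) (hpre : Pre_format_days_py days) :
    (PySem.Set.equal (PySem.Set.ofList days) (PySem.Set.ofList [0, 1, 2, 3, 4, 5, 6]) = true) ↔
    (PySem.Set.len (PySem.Set.ofList ((PySem.Set.ofList days).map pvRankF)) = 7) := by
  have hofall : PySem.Set.ofList ([0, 1, 2, 3, 4, 5, 6] : List Int) = [0, 1, 2, 3, 4, 5, 6] := by decide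
  have hndr := PySem.Set.nodup_ofList ((PySem.Set.ofList days).map pvRankF)
  have hsubr : PySem.Set.ofList ((PySem.Set.ofList days).map pvRankF) ⊆ ([0, 1, 2, 3, 4, 5, 6] : List Int) := by
    intro r hr
    obtain ⟨d, hd, hrd⟩ := List.mem_map.mp ((PySem.Set.mem_ofList _ r).mp hr)
    have hb := pv_mem_set days hpre hd
    subst hrd
    obtain ⟨h1, h2⟩ := hb
    interval_cases d <;> decide
  rw [PySem.Set.equal_iff, hofall, PySem.Set.len]
  constructor
  · intro h
    have hsup : ([0, 1, 2, 3, 4, 5, 6] : List Int) ⊆ PySem.Set.ofList ((PySem.Set.ofList days).map pvRankF) := by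
      intro r hr
      -- each rank r is pvRankF of the corresponding valid day, which h puts in set(days)
      fin_cases hr
      · exact (pv_mem_ranks_iff days hpre 6 (by omega) (by omega)).mpr ((h 6).mpr (by decide))
      · exact (pv_mem_ranks_iff days hpre 0 (by omega) (by omega)).mpr ((h 0).mpr (by decide))
      · exact (pv_mem_ranks_iff days hpre 1 (by omega) (by omega)).mpr ((h 1).mpr (by decide))
      · exact (pv_mem_ranks_iff days hpre 2 (by omega) (by omega)).mpr ((h 2).mpr (by decide))
      · exact (pv_mem_ranks_iff days hpre 3 (by omega) (by omega)).mpr ((h 3).mpr (by decide))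
      · exact (pv_mem_ranks_iff days hpre 4 (by omega) (by omega)).mpr ((h 4).mpr (by decide))
      · exact (pv_mem_ranks_iff days hpre 5 (by omega) (by omega)).mpr ((h 5).mpr (by decide))
    have hperm : (PySem.Set.ofList ((PySem.Set.ofList days).map pvRankF)).Perm ([0, 1, 2, 3, 4, 5, 6] : List Int) :=
      (hndr.subperm hsubr).perm_of_length_le (by
        have := ((by decide : ([0, 1, 2, 3, 4, 5, 6] : List Int).Nodup).subperm hsup).length_le
        simpa using this)
    simp [hperm.length_eq]
  · intro h
    have hlen : (PySem.Set.ofList ((PySem.Set.ofList days).map pvRankF)).length = 7 := by omega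
    have hperm : (PySem.Set.ofList ((PySem.Set.ofList days).map pvRankF)).Perm ([0, 1, 2, 3, 4, 5, 6] : List Int) :=
      (hndr.subperm hsubr).perm_of_length_le (by simp [hlen])
    intro x
    constructor
    · exact fun hx => pv_subset_all days hpre hx
    · intro hx
      have hb : 0 ≤ x ∧ x ≤ 6 := by
        simp only [List.mem_cons, List.not_mem_nil, or_false] at hx
        omega
      apply (pv_mem_ranks_iff days hpre x hb.1 hb.2).mp
      apply hperm.mem_iff.mpr
      obtain ⟨h1, h2⟩ := hb
      interval_cases x <;> decide

-- A's sort of set(days) IS the Sunday-first order filtered by membership, under Pre_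
theorem pv_sorted_eq_filter (days : List Int) (hpre : Pre_format_days_py days) :
    PySem.List.sorted (PySem.Set.ofList days) pvKeyA =
    ([6, 0, 1, 2, 3, 4, 5] : List Int).filter
      (fun d => PySem.Set.contains (PySem.Set.ofList days) d) := by
  apply PySem.List.sorted_eq_of_perm_of_pairwise_lt
  · -- the filtered order list is a permutation of set(days)
    have hnd := PySem.Set.nodup_ofList (α := Int) days
    apply List.Subperm.perm_of_length_le
    · exact (List.Nodup.filter _ (by decide)).subperm (by
        intro x hx
        have := List.of_mem_filter hx
        simpa [PySem.Set.contains] using this)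
    · have : (PySem.Set.ofList days).Subperm
          (([6, 0, 1, 2, 3, 4, 5] : List Int).filter
            (fun d => PySem.Set.contains (PySem.Set.ofList days) d)) := by
        apply hnd.subperm
        intro x hx
        have hr := pv_mem_set days hpre hx
        apply List.mem_filter.mpr
        refine ⟨by simp only [List.mem_cons, List.not_mem_nil, or_false]; omega, ?_⟩
        simpa [PySem.Set.contains] using hx
      simpa using this.length_le
  · -- keys strictly increase along the filtered list
    exact List.Pairwise.filter _ (by decide)

-- B's rank-space filter of range(7) is the day-space filter of the Sunday-first order, mapped by rank
theorem pv_range_filter (days : List Int) (hpre : Pre_format_days_py days) :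
    (PySem.List.pyRange 0 7 1).filter
      (fun r => PySem.Set.contains (PySem.Set.ofList ((PySem.Set.ofList days).map pvRankF)) r) =
    (([6, 0, 1, 2, 3, 4, 5] : List Int).filter
      (fun d => PySem.Set.contains (PySem.Set.ofList days) d)).map pvRankF := by
  have hrange : PySem.List.pyRange 0 7 1 = ([6, 0, 1, 2, 3, 4, 5] : List Int).map pvRankF := by decide
  rw [hrange, List.filter_map]
  congr 1
  apply List.filter_congr
  intro d hd
  have hb : 0 ≤ d ∧ d ≤ 6 := by fin_cases hd <;> omega
  simp only [Function.comp, PySem.Set.contains]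
  rw [← Bool.coe_iff_coe]
  simp only [List.contains_iff_mem]
  exact pv_mem_ranks_iff days hpre d hb.1 hb.2

-- ===== VERDICT (by name: the statement is the Claim_ definition above) =====
theorem format_days_py_spec : Claim_equal_format_days_py := by
  intro days _ hpre
  unfold Spec_format_days_py format_days_py format_days_py_alt
  by_cases hnil : days = []
  · simp [hnil]
  · simp only [hnil, if_false]
    by_cases hev : PySem.Set.equal (PySem.Set.ofList days) (PySem.Set.ofList [0, 1, 2, 3, 4, 5, 6]) = true
    · rw [if_pos hev, if_pos ((pv_everyday_iff days hpre).mp hev)]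
    · rw [if_neg hev, if_neg (fun h => hev ((pv_everyday_iff days hpre).mpr h))]
      rw [pv_sorted_eq_filter days hpre, pv_range_filter days hpre, List.map_map]
      congr 1
      apply List.map_congr_left
      intro d hd
      have hd6 : d ∈ ([6, 0, 1, 2, 3, 4, 5] : List Int) := List.mem_of_mem_filter hd
      fin_cases hd6 <;> decide
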